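-- pv_equiv track=rewrite | github.com/bcmeireles/Buggy-Data-Base | bdb.py | validate_cipher
-- ===== SOURCE A (Python) =====
-- def is_entry(arg):
--     """
--     Receives an argument of any type but only returns True if it corresponds to a BDB's entry (tuple with 3 fields,
--     corresponding to a cipher, a control sequence and a security sequence)
--
--     - Cipher contains one or more encrypted words, delimited by "-"
--     - Control sequence is composed by 5 lowercase letters between "[ ]"
--     - Security sequence is a tuple with two or more positive integrers
--
--     universal --> bool
--     """
--
--     valid = False
--
--     if type(arg) != tuple:
--         return False
--
--     if len(arg) != 3:
--         return False
--
--     if type(arg[0]) != str or type(arg[1]) != str or type(arg[2]) != tuple: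
--         return False
--
--     if len(arg[0]) > 0 and len(arg[1]) == 7 and len(arg[2]) > 1:
--         if not " " in arg[0]:
--             if arg[0][0] != '-' and arg[0][-1] != '-':
--                 if arg[1][0] == '[' and arg[1][6] == ']' and arg[1].islower():
--                     if arg[1].count('[') == 1 and arg[1].count(']') == 1:
--                         if not '--' in arg[0]:
--                             for c in arg[0]:
--                                 if c == '-' or (c.isalpha() and c.islower()):
--                                     valid = True
--                                 else:
--                                     valid = False
--
--     if valid:
--         for number in arg[2]:
--             if not (type(number) == int and number > 0):
--                 valid = False
--
--     return valid
--
-- def validate_cipher(cipher, control):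
--     """
--     Receives two strings, one being a cipher and the other a control sequence
--     it will return True only if both arguments are compatible
--
--     str x str --> bool
--     """
--
--     valid = False
--     letters = []
--     numbers = []
--
--     if is_entry((cipher, control, (950,300))):
--         for c in cipher:
--             if c.isalpha and not c in letters and c != '-':
--                 letters.append(c)
--
--         letters = sorted(letters) # alphabetic order
--
--         for letter in letters:
--             numbers.append(cipher.count(letter)) # how many times each letter is present
--
--         dic = dict(zip(letters,numbers)) # dictionary with both lists
--
--         sorted_dic = sorted(dic, key=dic.get, reverse=True)[:5] # sort letters by amount of times they appear, from most to less
--         a = "".join(sorted_dic)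
--         if control[1:-1] == a:
--             valid = True
--         else:
--             valid = False
--     else:
--         valid = False
--
--     return valid
-- ===== SOURCE B (Python) =====
-- def is_entry(arg):
--     """Same guard as the original module (unchanged)."""
--     valid = False
--     if type(arg) != tuple:
--         return False
--     if len(arg) != 3:
--         return False
--     if type(arg[0]) != str or type(arg[1]) != str or type(arg[2]) != tuple:
--         return False
--     if len(arg[0]) > 0 and len(arg[1]) == 7 and len(arg[2]) > 1:
--         if not " " in arg[0]:
--             if arg[0][0] != '-' and arg[0][-1] != '-':
--                 if arg[1][0] == '[' and arg[1][6] == ']' and arg[1].islower():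
--                     if arg[1].count('[') == 1 and arg[1].count(']') == 1:
--                         if not '--' in arg[0]:
--                             for c in arg[0]:
--                                 if c == '-' or (c.isalpha() and c.islower()):
--                                     valid = True
--                                 else:
--                                     valid = False
--     if valid:
--         for number in arg[2]:
--             if not (type(number) == int and number > 0):
--                 valid = False
--     return valid
--
--
-- def validate_cipher(cipher, control):
--     """Selection instead of sorting: count letters once, then extract the most
--     frequent remaining letter (smallest letter on ties) five times, comparing
--     each directly against the corresponding control character and stopping at
--     the first mismatch.  No sort, no slice, no joined string is ever built."""
--     if not is_entry((cipher, control, (950, 300))):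
--         return False
--     counts = {}
--     for c in cipher:
--         if c != '-':
--             counts[c] = counts.get(c, 0) + 1
--     for i in range(1, 6):
--         if not counts:
--             return False
--         best = min(counts, key=lambda ch: (-counts[ch], ch))
--         if control[i] != best:
--             return False
--         del counts[best]
--     return True
-- ===== Notes on version B (the rewrite author's own statement) =====
-- stated objective: alternative
-- what changed: B keeps the identical is_entry guard but replaces A's staged pipeline (collect distinct letters, alphabetically pre-sort, count each with cipher.count, fully sort by frequency, slice, join, compare strings) by top-5 selection: one counting pass, then five rounds that each extract the most frequent remaining letter (smallest on ties) and compare it directly to the corresponding control character, returning False at the first mismatch; no sort, slice or joined string is built.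
import Mathlib
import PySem

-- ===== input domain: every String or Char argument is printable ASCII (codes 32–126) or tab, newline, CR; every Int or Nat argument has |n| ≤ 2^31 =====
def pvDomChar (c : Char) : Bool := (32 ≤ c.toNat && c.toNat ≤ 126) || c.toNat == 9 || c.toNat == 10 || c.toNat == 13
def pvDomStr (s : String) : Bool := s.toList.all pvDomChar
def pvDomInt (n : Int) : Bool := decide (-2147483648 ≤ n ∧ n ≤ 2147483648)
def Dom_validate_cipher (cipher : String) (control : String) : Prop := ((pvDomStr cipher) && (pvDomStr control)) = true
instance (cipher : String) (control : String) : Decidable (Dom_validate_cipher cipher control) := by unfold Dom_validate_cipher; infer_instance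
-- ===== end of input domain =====

-- B keeps the identical is_entry guard but replaces A's full frequency sort, slice and join by
-- top-5 selection: one counting pass, then five rounds each extracting the most frequent remaining
-- letter (smallest on ties) and comparing it directly to the matching control character.

-- ===== PORT A =====

-- s.islower() for a whole string: at least one cased character and no uppercase one; exact on ASCII (Dom)
def strIslower (ks : List Char) : Bool :=
  ks.any PySem.Chars.islower && !(ks.any PySem.Chars.isupper)

-- transliteration of is_entry((cipher, control, (950, 300))); the type/arity checks on the tuple
-- argument and 'len(arg[2]) > 1' are statically satisfied at this call site
def isEntry (cipher control : String) : Bool :=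
  let cs := cipher.toList
  let ks := control.toList
  let valid : Bool :=
    if cs.length > 0 && ks.length == 7 then
      if !(PySem.Chars.isIn [' '] cs) then
        if (PySem.List.pyGet? cs 0 != some '-') && (PySem.List.pyGet? cs (-1) != some '-') then
          if (PySem.List.pyGet? ks 0 == some '[') && (PySem.List.pyGet? ks 6 == some ']')
              && strIslower ks then
            if (PySem.Chars.count ks ['['] == 1) && (PySem.Chars.count ks [']'] == 1) then
              if !(PySem.Chars.isIn ['-', '-'] cs) then
                cs.foldl (fun _v c =>
                  if c == '-' || (PySem.Chars.isalpha c && PySem.Chars.islower c) then true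
                  else false) false
              else false
            else false
          else false
        else false
      else false
    else false
  -- security-sequence loop over (950, 300)
  if valid then [(950 : Int), 300].foldl (fun v n => if !(decide (0 < n)) then false else v) valid
  else valid

def validate_cipher (cipher : String) (control : String) : Bool :=
  if isEntry cipher control then
    -- `c.isalpha` (unparenthesised, a bound method) is always truthy in Python
    let letters := cipher.toList.foldl
      (fun ls c => if (!ls.contains c) && (c != '-') then ls ++ [c] else ls) ([] : List Char)
    let letters := PySem.List.sorted letters (fun x => x) false
    let numbers := letters.map (fun l => (PySem.Str.count cipher (String.ofList [l]) : Int))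
    let dic := PySem.Dict.ofList (letters.zip numbers)
    -- key=dic.get: every key iterated is present in dic, so the value is dic.getD k 0
    let sorted_dic := PySem.List.slice
      (PySem.List.sorted dic.keys (fun k => dic.getD k 0) true) none (some 5)
    let a := PySem.Chars.join [] (sorted_dic.map (fun c => [c]))
    decide (PySem.List.slice control.toList (some 1) (some (-1)) = a)
  else false

-- ===== PORT B =====

-- the 'for i in range(1, 6)' loop of B: empty-dict check, min by (-count, ch), compare, delete
def altGo (ctrl : List Char) : List Int → PySem.Dict Char Int → Bool
  | [], _ => true
  | i :: rest, counts =>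
      if counts.items.isEmpty then false
      else
        match PySem.List.min2? counts.keys (fun ch => -(counts.getD ch 0)) (fun ch => ch) with
        | none => false
        | some best =>
            if PySem.List.pyGet? ctrl i != some best then false
            else altGo ctrl rest (counts.erase best)

def validate_cipher_alt (cipher : String) (control : String) : Bool :=
  if isEntry cipher control then
    let counts := cipher.toList.foldl
      (fun d c => if c != '-' then d.insert c (d.getD c 0 + 1) else d)
      (PySem.Dict.empty : PySem.Dict Char Int)
    altGo control.toList (PySem.List.pyRange 1 6 1) counts
  else false

-- ===== PRECONDITION & SPEC =====
def Spec_validate_cipher (cipher : String) (control : String) (out : Bool) : Prop := out = validate_cipher_alt cipher control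
instance (cipher : String) (control : String) (out : Bool) : Decidable (Spec_validate_cipher cipher control out) := by unfold Spec_validate_cipher; infer_instance

-- ===== CLAIM (what is proved, stated in full; the proofs are below) =====
def Claim_equal_validate_cipher : Prop := ∀ (cipher : String) (control : String), Dom_validate_cipher cipher control → Spec_validate_cipher cipher control (validate_cipher cipher control)

-- ===== LEMMAS AND PROOFS =====

-- single-character substring count is character count
lemma count_go_singleton (c : Char) :
    ∀ (l : List Char) (fuel acc : ℕ), l.length ≤ fuel →
      PySem.Chars.count.go [c] fuel l acc = acc + l.count c := by
  intro l
  induction l with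
  | nil =>
      intro fuel acc _
      cases fuel <;> simp [PySem.Chars.count.go]
  | cons h t ih =>
      intro fuel acc hf
      cases fuel with
      | zero => simp at hf
      | succ m =>
          have hlen : t.length ≤ m := by simpa using hf
          simp only [PySem.Chars.count.go, List.isPrefixOf,
            Bool.and_true, List.count_cons, List.length_cons, List.drop_succ_cons,
            List.length_nil, List.drop_zero]
          by_cases hc : (c == h) = true
          · rw [if_pos hc, ih m (acc + 1) hlen]
            have hcc : c = h := beq_iff_eq.mp hc
            subst hcc
            rw [BEq.rfl]; simp; omega
          · rw [if_neg hc, ih m acc hlen]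
            have hne : (h == c) = false := by
              rw [beq_eq_false_iff_ne]
              intro he
              exact hc (beq_iff_eq.mpr he.symm)
            rw [hne]; simp

lemma strCount_singleton (s : String) (c : Char) :
    PySem.Str.count s (String.ofList [c]) = s.toList.count c := by
  rw [PySem.Str.count_eq]
  have h1 : (String.ofList [c]).toList = [c] := by simp
  rw [h1]
  simp only [PySem.Chars.count, List.isEmpty, Bool.false_eq_true, if_false]
  rw [count_go_singleton c s.toList s.toList.length 0 le_rfl]
  omega

lemma char_toNat_lt (c : Char) : c.toNat < 1114112 := by
  have h := c.valid
  rcases h with h | ⟨h1, h2⟩ <;> · rw [Char.toNat]; omega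

lemma char_lt_iff (a b : Char) : a < b ↔ a.toNat < b.toNat := by
  rw [Char.lt_def, UInt32.lt_iff_toNat_lt]; rfl

lemma char_toNat_inj (a b : Char) (h : a.toNat = b.toNat) : a = b := by
  apply Char.ext
  apply UInt32.toNat_inj.mp
  rw [Char.toNat_val, Char.toNat_val]; exact h

-- single-Int encoding of the lexicographic key (-g ch, ch)
def encKey (g : Char → Int) (c : Char) : Int := -(g c) * 1114112 + (c.toNat : Int)

lemma encKey_inj (g : Char → Int) : Function.Injective (encKey g) := by
  intro a b h
  have ha := char_toNat_lt a; have hb := char_toNat_lt b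
  unfold encKey at h
  exact char_toNat_inj a b (by omega)

lemma insertBy_congr {α : Type} (p q : α → α → Bool) (x : α) :
    ∀ (acc : List α), (∀ y ∈ acc, p x y = q x y) →
      PySem.List.insertBy p x acc = PySem.List.insertBy q x acc := by
  intro acc h
  induction acc with
  | nil => rfl
  | cons y ys ih =>
      have hy : p x y = q x y := h y (List.mem_cons_self)
      simp only [PySem.List.insertBy, hy]
      split
      · rfl
      · rw [ih (fun z hz => h z (List.mem_cons_of_mem _ hz))]

-- stability: a reverse stable sort by g of a strictly alphabetically increasing list
-- equals the plain sort by the (-g, char) encoding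
lemma fold_agree (g1 g2 : Char → Int) :
    ∀ (xs acc : List Char), xs.Pairwise (· < ·) → (∀ x ∈ xs, g1 x = g2 x) →
      (∀ y ∈ acc, g1 y = g2 y ∧ ∀ x ∈ xs, y < x) →
      List.foldl (fun a x => PySem.List.insertBy (fun a b => decide (g1 b < g1 a)) x a) acc xs
        = List.foldl (fun a x => PySem.List.insertBy (fun a b => decide (encKey g2 a < encKey g2 b)) x a) acc xs := by
  intro xs
  induction xs with
  | nil => intro acc _ _ _; rfl
  | cons x t ih =>
      intro acc hp hx hacc
      have hgx : g1 x = g2 x := hx x (List.mem_cons_self)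
      have hstep : PySem.List.insertBy (fun a b => decide (g1 b < g1 a)) x acc
          = PySem.List.insertBy (fun a b => decide (encKey g2 a < encKey g2 b)) x acc := by
        apply insertBy_congr
        intro y hy
        obtain ⟨hg, hlt⟩ := hacc y hy
        have hyx' : y.toNat < x.toNat := (char_lt_iff y x).mp (hlt x (List.mem_cons_self))
        have ha := char_toNat_lt x; have hb := char_toNat_lt y
        rw [hg, hgx]
        rcases lt_trichotomy (g2 y) (g2 x) with h | h | h <;>
          · simp only [encKey]; rw [decide_eq_decide]; omega
      simp only [List.foldl_cons, hstep]
      apply ih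
      · exact hp.of_cons
      · exact fun z hz => hx z (List.mem_cons_of_mem _ hz)
      · intro y hy
        rcases (PySem.List.mem_insertBy _ _ _ _).mp hy with rfl | hy'
        · exact ⟨hgx, fun z hz => (List.pairwise_cons.mp hp).1 z hz⟩
        · obtain ⟨hg, hlt⟩ := hacc y hy'
          exact ⟨hg, fun z hz => hlt z (List.mem_cons_of_mem _ hz)⟩

lemma sorted_rev_eq_sorted_encKey (g1 g2 : Char → Int) (xs : List Char)
    (hp : xs.Pairwise (· < ·)) (hx : ∀ x ∈ xs, g1 x = g2 x) :
    PySem.List.sorted xs g1 true = PySem.List.sorted xs (encKey g2) false := by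
  rw [PySem.List.sorted_rev_eq_foldl_insertBy, PySem.List.sorted_eq_foldl_insertBy]
  exact fold_agree g1 g2 xs [] hp hx (by simp)

lemma letters_eq (cs : List Char) :
    cs.foldl (fun ls c => if (!ls.contains c) && (c != '-') then ls ++ [c] else ls) [] =
      PySem.Set.ofList (cs.filter (fun c => c != '-')) := by
  have hfun : (fun (ls : List Char) c => if (!ls.contains c) && (c != '-') then ls ++ [c] else ls)
      = fun ls c => if (c != '-') then PySem.Set.add ls c else ls := by
    funext ls c
    by_cases h1 : (c != '-') = true <;> by_cases h2 : ls.contains c = true <;>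
      simp [PySem.Set.add, h1]
  rw [hfun, PySem.List.foldl_if_eq_foldl_filter, ← PySem.Set.ofList_eq_foldl]

lemma counts_eq (cs : List Char) :
    cs.foldl (fun d c => if c != '-' then d.insert c (d.getD c 0 + 1) else d)
        (PySem.Dict.empty : PySem.Dict Char Int)
      = PySem.Dict.counter (cs.filter (fun c => c != '-')) := by
  rw [PySem.List.foldl_if_eq_foldl_filter, PySem.Dict.foldl_insert_getD_add_one_eq_counter]

lemma dic_items (L : List Char) (f : Char → Int) (hL : L.Nodup) :
    (PySem.Dict.ofList (L.zip (L.map f))).items = L.map (fun a => (a, f a)) := by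
  have hz : L.zip (L.map f) = L.map (fun a => (a, f a)) := by
    have h := List.zip_map' (f := id) (g := f) (l := L)
    rw [List.map_id] at h
    simpa using h
  rw [hz]
  simp only [PySem.Dict.ofList, PySem.Dict.update, List.foldl_map]
  have h := PySem.Dict.items_foldl_insert_fresh L (fun a => a) f PySem.Dict.empty
    (by intro a _; simp [PySem.Dict.contains_empty]) (by simpa using hL)
  simpa using h

lemma dic_keys (L : List Char) (f : Char → Int) (hL : L.Nodup) :
    (PySem.Dict.ofList (L.zip (L.map f))).keys = L := by
  simp [PySem.Dict.keys, dic_items L f hL, Function.comp_def]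

lemma dic_getD (L : List Char) (f : Char → Int) (hL : L.Nodup) {x : Char} (hx : x ∈ L) :
    (PySem.Dict.ofList (L.zip (L.map f))).getD x 0 = f x := by
  apply PySem.Dict.getD_of_mem_items
  · rw [dic_items L f hL]
    exact List.mem_map.mpr ⟨x, hx, rfl⟩
  · rw [dic_keys L f hL]; exact hL

-- A's sorted_dic (before the [:5] slice) is the plain sort of the non-'-' letters by encKey of their counts
lemma a_sorted_eq (cipher : String) :
    (let letters := cipher.toList.foldl
        (fun ls c => if (!ls.contains c) && (c != '-') then ls ++ [c] else ls) ([] : List Char)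
     let letters := PySem.List.sorted letters (fun x => x) false
     let numbers := letters.map (fun l => (PySem.Str.count cipher (String.ofList [l]) : Int))
     let dic := PySem.Dict.ofList (letters.zip numbers)
     PySem.List.sorted dic.keys (fun k => dic.getD k 0) true)
    = PySem.List.sorted (PySem.Set.ofList (cipher.toList.filter (fun c => c != '-')))
        (encKey (fun ch => ((cipher.toList.filter (fun c => c != '-')).count ch : Int))) false := by
  simp only []
  rw [letters_eq]
  set F := cipher.toList.filter (fun c => c != '-') with hF
  set L := PySem.List.sorted (PySem.Set.ofList F) (fun x => x) false with hLdef
  set f : Char → Int := fun l => (PySem.Str.count cipher (String.ofList [l]) : Int) with hfdef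
  have hnd : L.Nodup := (PySem.List.sorted_perm (PySem.Set.ofList F) (fun x => x) false).symm.nodup (PySem.Set.nodup_ofList F)
  have hp : L.Pairwise (· < ·) := PySem.List.sorted_ofList_pairwise_lt F
  set g2 : Char → Int := fun ch => ((F.count ch : Nat) : Int) with hg2def
  rw [dic_keys L f hnd, PySem.List.sorted_eq_sorted_of_perm (PySem.Set.ofList F) L (encKey g2) (encKey_inj g2)
      (PySem.List.sorted_perm (PySem.Set.ofList F) (fun x => x) false).symm]
  apply sorted_rev_eq_sorted_encKey _ g2 L hp
  intro x hxL
  have hxF : x ∈ F := (PySem.Set.mem_ofList F x).mp ((PySem.List.mem_sorted ..).mp hxL)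
  have hxfil := List.mem_filter.mp hxF
  rw [dic_getD L f hnd hxL, hfdef]
  simp only [hg2def]
  rw [strCount_singleton, hF, List.count_filter (p := fun c => c != '-') (a := x) hxfil.2]

-- B's min by the tuple key (-count, ch) is min by the single-Int encoding
lemma min2_eq_min_encKey (g : Char → Int) (xs : List Char) :
    PySem.List.min2? xs (fun ch => -(g ch)) (fun ch => ch) = PySem.List.min? xs (encKey g) := by
  unfold PySem.List.min2? PySem.List.min?
  congr 1
  funext acc x
  cases acc with
  | none => rfl
  | some m =>
      dsimp only
      have ha := char_toNat_lt x; have hb := char_toNat_lt m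
      by_cases h : encKey g x < encKey g m
      · rw [if_pos h, if_pos]
        simp only [encKey] at h
        simp only [Bool.or_eq_true, decide_eq_true_eq, Bool.and_eq_true, Bool.not_eq_true',
          decide_eq_false_iff_not, char_lt_iff]
        omega
      · rw [if_neg h, if_neg]
        simp only [encKey] at h
        simp only [Bool.or_eq_true, decide_eq_true_eq, Bool.and_eq_true, Bool.not_eq_true',
          decide_eq_false_iff_not, char_lt_iff]
        omega

-- min? only looks at the keys of the list's elements
lemma foldl_congr_invariant {s a : Type} (f g : s → a → s) (P : s → Prop) :
    ∀ (xs : List a) (st : s), P st →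
      (∀ st' x, P st' → x ∈ xs → f st' x = g st' x ∧ P (f st' x)) →
      xs.foldl f st = xs.foldl g st := by
  intro xs
  induction xs with
  | nil => intro st _ _; rfl
  | cons x t ih =>
      intro st hP hstep
      obtain ⟨heq, hP'⟩ := hstep st x hP List.mem_cons_self
      rw [List.foldl_cons, List.foldl_cons, heq]
      exact ih _ (heq ▸ hP') (fun st' y hPs hy => hstep st' y hPs (List.mem_cons_of_mem _ hy))

lemma min?_congr_mem (k1 k2 : Char → Int) (xs : List Char) (h : ∀ x ∈ xs, k1 x = k2 x) :
    PySem.List.min? xs k1 = PySem.List.min? xs k2 := by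
  unfold PySem.List.min?
  refine foldl_congr_invariant _ _ (fun acc => ∀ m, acc = some m → k1 m = k2 m)
    xs none (fun m hm => nomatch hm) ?_
  intro st x hP hx
  cases st with
  | none =>
      refine ⟨rfl, ?_⟩
      intro m hm
      dsimp only at hm
      cases hm
      exact h x hx
  | some m =>
      have hk : k1 m = k2 m := hP m rfl
      dsimp only
      refine ⟨by rw [h x hx, hk], ?_⟩
      intro m' hm'
      by_cases hc : k1 x < k1 m
      · rw [if_pos hc] at hm'; cases hm'; exact h x hx
      · rw [if_neg hc] at hm'; cases hm'; exact hP m rfl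

-- with an injective key, min? is the head of the sorted list
lemma min?_eq_head_sorted (k : Char → Int) (hinj : Function.Injective k)
    (xs : List Char) {m : Char} {t : List Char}
    (h : PySem.List.sorted xs k false = m :: t) :
    PySem.List.min? xs k = some m := by
  have hmem : m ∈ xs := by
    have : m ∈ PySem.List.sorted xs k false := by rw [h]; exact List.mem_cons_self
    exact (PySem.List.mem_sorted ..).mp this
  have hne : xs ≠ [] := by intro hn; rw [hn] at hmem; cases hmem
  obtain ⟨m', hm'⟩ : ∃ m', PySem.List.min? xs k = some m' := by
    cases ho : PySem.List.min? xs k with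
    | none => exact absurd ((PySem.List.min?_eq_none_iff xs k).mp ho) hne
    | some v => exact ⟨v, rfl⟩
  have h1 : k m' ≤ k m := PySem.List.min?_isMin hm' m hmem
  have h2 : k m ≤ k m' := PySem.List.key_head_sorted_le xs k h m' (PySem.List.min?_mem hm')
  rw [hm', hinj (le_antisymm h1 h2)]

-- removing the head sorts to the tail
lemma sorted_erase_eq_tail (k : Char → Int) (hinj : Function.Injective k)
    (xs : List Char) (hnd : xs.Nodup) {m : Char} {t : List Char}
    (h : PySem.List.sorted xs k false = m :: t) :
    PySem.List.sorted (xs.erase m) k false = t := by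
  have hperm : (m :: t).Perm xs := by rw [← h]; exact PySem.List.sorted_perm xs k false
  have hpt : t.Perm (xs.erase m) := by
    have := hperm.symm.erase m
    rw [List.erase_cons_head] at this
    exact this.symm
  have hpw : (m :: t).Pairwise (fun a b => k a ≤ k b) := by
    rw [← h]; exact PySem.List.sorted_pairwise xs k
  have hndmt : (m :: t).Nodup := hperm.symm.nodup hnd
  have hlt : t.Pairwise (fun a b => k a < k b) := by
    have hall : (m :: t).Pairwise (fun a b => k a < k b) := by
      refine List.Pairwise.imp_of_mem ?_ (hpw.and (List.nodup_iff_pairwise_ne.mp hndmt))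
      intro a b _ _ hab
      exact lt_of_le_of_ne hab.1 (fun he => hab.2 (hinj he))
    exact hall.of_cons
  exact PySem.List.sorted_eq_of_perm_of_pairwise_lt (xs.erase m) t k hpt hlt

lemma map_fst_filter_ne (l : List (Char × Int)) (b : Char) :
    (l.filter (fun p => !(p.1 == b))).map Prod.fst
      = (l.map Prod.fst).filter (fun x => !(x == b)) := by
  induction l with
  | nil => rfl
  | cons p t ih =>
      by_cases hp : (p.1 == b) = true <;> simp [hp, ih]

lemma keys_erase_of_nodup (d : PySem.Dict Char Int) (b : Char) (hnd : d.keys.Nodup) :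
    (d.erase b).keys = d.keys.erase b := by
  have := List.Nodup.erase_eq_filter (l := d.keys) hnd b
  simp only [PySem.Dict.erase, PySem.Dict.keys] at *
  rw [map_fst_filter_ne, this]
  rfl

lemma nodup_keys_erase (d : PySem.Dict Char Int) (b : Char) (hnd : d.keys.Nodup) :
    (d.erase b).keys.Nodup := by
  rw [keys_erase_of_nodup d b hnd]
  exact hnd.erase b

lemma find?_filter_ne (ch b : Char) (h : ch ≠ b) : ∀ (l : List (Char × Int)),
    (l.filter (fun p => !(p.1 == b))).find? (fun p => p.1 == ch)
      = l.find? (fun p => p.1 == ch) := by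
  intro l
  induction l with
  | nil => rfl
  | cons p t ih =>
      by_cases hb : (p.1 == b) = true
      · have hpb : p.1 = b := beq_iff_eq.mp hb
        have hc : (p.1 == ch) = false := by
          rw [beq_eq_false_iff_ne, hpb]
          exact fun he => h he.symm
        simp [hb, hc, ih]
      · simp only [List.filter_cons, hb, Bool.not_false, if_pos]
        by_cases hc : (p.1 == ch) = true <;> simp [hc, ih]

lemma getD_erase_of_ne (d : PySem.Dict Char Int) (b ch : Char) (h : ch ≠ b) :
    (d.erase b).getD ch 0 = d.getD ch 0 := by
  simp only [PySem.Dict.getD_eq_get?_getD, PySem.Dict.get?, PySem.Dict.erase]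
  rw [find?_filter_ne ch b h]

-- the selection loop, characterised against the fully sorted key list
lemma altGo_spec (ctrl : List Char) (g : Char → Int) :
    ∀ (I : List Int) (d : PySem.Dict Char Int), d.keys.Nodup →
      (∀ ch ∈ d.keys, d.getD ch 0 = g ch) →
      altGo ctrl I d =
        decide (I.map (fun i => PySem.List.pyGet? ctrl i)
            = ((PySem.List.sorted d.keys (encKey g) false).take I.length).map some
          ∧ I.length ≤ d.keys.length) := by
  intro I
  induction I with
  | nil =>
      intro d _ _
      simp [altGo]
  | cons i rest ih =>
      intro d hnd hg
      cases hK : PySem.List.sorted d.keys (encKey g) false with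
      | nil =>
          have hk : d.keys = [] := (PySem.List.sorted_eq_nil_iff ..).mp hK
          have hitems : d.items.isEmpty = true := by
            simp only [PySem.Dict.keys] at hk
            cases h : d.items with
            | nil => rfl
            | cons p t => rw [h] at hk; simp at hk
          simp [altGo, hitems, hk]
      | cons m t =>
          have hmK : m ∈ d.keys := by
            have : m ∈ PySem.List.sorted d.keys (encKey g) false := by
              rw [hK]; exact List.mem_cons_self
            exact (PySem.List.mem_sorted ..).mp this
          have hitems : d.items.isEmpty = false := by
            cases h : d.items with
            | nil => rw [PySem.Dict.keys, h] at hmK; cases hmK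
            | cons p t' => rfl
          have hmin : PySem.List.min2? d.keys (fun ch => -(d.getD ch 0)) (fun ch => ch)
              = some m := by
            rw [min2_eq_min_encKey (fun ch => d.getD ch 0) d.keys]
            rw [min?_congr_mem _ (encKey g) d.keys
              (by intro x hx; simp only [encKey]; rw [hg x hx])]
            exact min?_eq_head_sorted (encKey g) (encKey_inj g) d.keys hK
          simp only [altGo, hitems, Bool.false_eq_true, if_false, hmin]
          by_cases hc : (PySem.List.pyGet? ctrl i != some m) = true
          · rw [if_pos hc]
            have hne : PySem.List.pyGet? ctrl i ≠ some m := by simpa using hc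
            simp only [List.map_cons, List.length_cons, List.take_succ_cons]
            rw [decide_eq_false]
            rintro ⟨h1, _⟩
            exact hne (by injection h1)
          · rw [if_neg hc]
            have heq : PySem.List.pyGet? ctrl i = some m := by simpa using hc
            have hnd' : (d.erase m).keys.Nodup := nodup_keys_erase d m hnd
            have hg' : ∀ ch ∈ (d.erase m).keys, (d.erase m).getD ch 0 = g ch := by
              intro ch hch
              rw [keys_erase_of_nodup d m hnd] at hch
              have hne : ch ≠ m := by
                intro he; rw [he] at hch
                exact (List.Nodup.not_mem_erase hnd) hch
              rw [getD_erase_of_ne d m ch hne]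
              exact hg ch (List.mem_of_mem_erase hch)
            rw [ih (d.erase m) hnd' hg']
            have hsorted' : PySem.List.sorted (d.erase m).keys (encKey g) false = t := by
              rw [keys_erase_of_nodup d m hnd]
              exact sorted_erase_eq_tail (encKey g) (encKey_inj g) d.keys hnd hK
            rw [hsorted', keys_erase_of_nodup d m hnd]
            have hlen : (d.keys.erase m).length = d.keys.length - 1 :=
              List.length_erase_of_mem hmK
            have hpos : 1 ≤ d.keys.length := List.length_pos_of_mem hmK
            rw [decide_eq_decide]
            simp only [List.map_cons, List.length_cons, List.take_succ_cons, heq,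
              List.cons_eq_cons]
            constructor
            · rintro ⟨h1, h2⟩
              exact ⟨⟨trivial, h1⟩, by omega⟩
            · rintro ⟨⟨_, h1⟩, h2⟩
              exact ⟨h1, by omega⟩

-- isEntry = true forces the control string to have length 7
lemma isEntry_control_len (cipher control : String) (h : isEntry cipher control = true) :
    control.toList.length = 7 := by
  by_contra hne
  have h7 : ¬ (control.length = 7) := by
    intro he
    exact hne (by rw [String.length_toList]; exact he)
  simp [isEntry, h7] at h

-- the five positional comparisons against a length-7 control equal A's slice comparison
lemma final_iff (l : List Char) (hl : l.length = 7) (S : List Char) :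
    ([PySem.List.pyGet? l 1, PySem.List.pyGet? l 2, PySem.List.pyGet? l 3,
      PySem.List.pyGet? l 4, PySem.List.pyGet? l 5] = (S.take 5).map some ∧ 5 ≤ S.length)
    ↔ PySem.List.slice l (some 1) (some (-1)) = S.take 5 := by
  obtain ⟨a, b, c, d, e, f, g, rfl⟩ :
      ∃ a b c d e f g, l = [a, b, c, d, e, f, g] := by
    rcases l with _ | ⟨a, _ | ⟨b, _ | ⟨c, _ | ⟨d, _ | ⟨e, _ | ⟨f, _ | ⟨g, rest⟩⟩⟩⟩⟩⟩⟩ <;>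
      simp only [List.length_cons, List.length_nil] at hl <;> try omega
    have hr : rest = [] := by
      cases rest with
      | nil => rfl
      | cons x t => simp at hl
    exact ⟨a, b, c, d, e, f, g, by rw [hr]⟩
  have hs : PySem.List.slice [a, b, c, d, e, f, g] (some 1) (some (-1)) = [b, c, d, e, f] := by
    simp [PySem.List.slice]
  have hg : [PySem.List.pyGet? [a, b, c, d, e, f, g] (1 : Int),
      PySem.List.pyGet? [a, b, c, d, e, f, g] 2, PySem.List.pyGet? [a, b, c, d, e, f, g] 3,
      PySem.List.pyGet? [a, b, c, d, e, f, g] 4, PySem.List.pyGet? [a, b, c, d, e, f, g] 5]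
      = [some b, some c, some d, some e, some f] := by
    simp [PySem.List.pyGet?, PySem.List.pyIdx?]
  rw [hs, hg]
  constructor
  · rintro ⟨h1, _⟩
    have h2 : List.map some [b, c, d, e, f] = (S.take 5).map some := by simpa using h1
    exact List.map_injective_iff.mpr (Option.some_injective _) h2
  · intro h
    refine ⟨by rw [← h]; rfl, ?_⟩
    have hlen5 : (S.take 5).length = 5 := by rw [← h]; rfl
    rw [List.length_take] at hlen5
    omega

-- ===== VERDICT (by name: the statement is the Claim_ definition above) =====
theorem validate_cipher_spec : Claim_equal_validate_cipher := by
  intro cipher control _hdom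
  unfold Spec_validate_cipher validate_cipher validate_cipher_alt
  by_cases hE : isEntry cipher control = true
  · have hlen := isEntry_control_len cipher control hE
    have hA := a_sorted_eq cipher
    simp only [hE, if_true]
    simp only [] at hA ⊢
    rw [hA, counts_eq]
    have hrange : PySem.List.pyRange 1 6 1 = [(1 : Int), 2, 3, 4, 5] := by decide
    rw [hrange, altGo_spec control.toList
      (fun ch => (((cipher.toList.filter (fun c => c != '-')).count ch : Nat) : Int))
      [(1 : Int), 2, 3, 4, 5]
      (PySem.Dict.counter (cipher.toList.filter (fun c => c != '-')))
      (PySem.Dict.nodup_keys_counter _)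
      (by intro ch _; rw [PySem.Dict.getD_counter])]
    rw [PySem.Dict.keys_counter]
    rw [PySem.List.slice_to _ (by norm_num), PySem.Chars.join_nil_singletons]
    set F := cipher.toList.filter (fun c => c != '-') with hF
    set S := PySem.List.sorted (PySem.Set.ofList F)
      (encKey (fun ch => ((F.count ch : Nat) : Int))) false with hS
    have hlenS : (PySem.Set.ofList F).length = S.length := by
      rw [hS, PySem.List.length_sorted]
    rw [hlenS, decide_eq_decide]
    have hfin := final_iff control.toList hlen S
    simp only [List.map_cons, List.map_nil, List.length_cons, List.length_nil] at *
    exact (hfin.symm)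
  · simp [hE]
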